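-- pv_equiv track=rewrite | github.com/TEAM-528/problem-solving | 정주완/Programmers/Level 3/스타 수열.py | solution
-- ===== SOURCE A (Python) =====
-- def solution(a):
--     seq_info = {}
--
--     for i in range(len(a)):
--         if a[i] not in seq_info:
--             # a[i]를 교집합으로 하는 스타수열 정보 [스타 수열 길이, 마지막으로 스타수열을 만드는 인덱스]
--             seq_info[a[i]] = [0, -1]
--
--         if i > 0 and seq_info[a[i]][1] < i - 1 and a[i - 1] != a[i]:
--             # [ a[i-1], a[i] ]를 스타 수열에 추가할 수 있다면
--             seq_info[a[i]][0] += 2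
--             seq_info[a[i]][1] = i
--         elif i < len(a) - 1 and seq_info[a[i]][1] < i and a[i + 1] != a[i]:
--             # [ a[i], a[i + 1] ]를 스타 수열에 추가할 수 있다면
--             seq_info[a[i]][0] += 2
--             seq_info[a[i]][1] = i + 1
--
--     return max(star_sequence_length for star_sequence_length, _ in seq_info.values())
-- ===== SOURCE B (Python) =====
-- def solution(a):
--     n = len(a)
--     # group the indices of each value in one pass
--     pos = {}
--     for i in range(n):
--         pos.setdefault(a[i], []).append(i)
--
--     def star_len(v, idxs):
--         # greedy over this value's occurrence positions only
--         length, last = 0, -1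
--         for i in idxs:
--             if i > 0 and last < i - 1 and a[i - 1] != v:
--                 length += 2
--                 last = i
--             elif i < n - 1 and last < i and a[i + 1] != v:
--                 length += 2
--                 last = i + 1
--         return length
--
--     return max(star_len(v, idxs) for v, idxs in pos.items())
-- ===== Notes on version B (the rewrite author's own statement) =====
-- stated objective: alternative
-- what changed: A threads one dict of (length,last) greedy states for all values through a single pass; B instead groups each value's occurrence indices in one pass and then runs an independent greedy scan over each value's positions, taking the max of the per-value lengths.
-- outside the precondition, e.g. on solution([]): A raises ValueError, B raises ValueError
import Mathlib
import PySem

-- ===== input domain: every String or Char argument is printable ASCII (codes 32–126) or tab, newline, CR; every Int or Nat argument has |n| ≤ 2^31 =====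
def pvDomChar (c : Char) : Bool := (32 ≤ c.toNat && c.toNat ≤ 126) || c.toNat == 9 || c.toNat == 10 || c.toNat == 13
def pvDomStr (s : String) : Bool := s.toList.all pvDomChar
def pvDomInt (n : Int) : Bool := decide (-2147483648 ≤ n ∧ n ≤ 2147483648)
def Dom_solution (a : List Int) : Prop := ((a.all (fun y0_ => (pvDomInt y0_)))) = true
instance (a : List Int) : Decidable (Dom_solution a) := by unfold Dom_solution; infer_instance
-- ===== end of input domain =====

-- B replaces A's single pass threading a dict of per-value (length,last) states by grouping each
-- value's occurrence indices once and running an independent greedy per value (alternative decomposition).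


-- ===== PORT A =====
-- one loop step of A: setdefault a[i] to (0,-1), then try to extend that value's star sequence
def solutionStep (a : List Int) (n : Int) (d : PySem.Dict Int (Int × Int)) (i : Int) :
    PySem.Dict Int (Int × Int) :=
  let x := PySem.List.pyGetD a i 0
  let d := if d.contains x then d else d.insert x (0, -1)
  let e := d.getD x (0, -1)
  if 0 < i ∧ e.2 < i - 1 ∧ PySem.List.pyGetD a (i - 1) 0 ≠ x then
    d.insert x (e.1 + 2, i)
  else if i < n - 1 ∧ e.2 < i ∧ PySem.List.pyGetD a (i + 1) 0 ≠ x then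
    d.insert x (e.1 + 2, i + 1)
  else d

def solution (a : List Int) : Int :=
  (PySem.List.max?
    (((PySem.List.pyRange 0 (a.length : Int) 1).foldl
        (solutionStep a (a.length : Int)) PySem.Dict.empty).values.map (fun p => p.1))
    (fun x => x)).getD 0

-- ===== PORT B =====
-- one step of B's greedy over a single value's occurrence positions
def starStep (a : List Int) (n : Int) (v : Int) (st : Int × Int) (i : Int) : Int × Int :=
  if 0 < i ∧ st.2 < i - 1 ∧ PySem.List.pyGetD a (i - 1) 0 ≠ v then (st.1 + 2, i)
  else if i < n - 1 ∧ st.2 < i ∧ PySem.List.pyGetD a (i + 1) 0 ≠ v then (st.1 + 2, i + 1)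
  else st

def starLen (a : List Int) (v : Int) (idxs : List Int) : Int :=
  (idxs.foldl (starStep a (a.length : Int) v) ((0 : Int), (-1 : Int))).1

def solution_alt (a : List Int) : Int :=
  (PySem.List.max?
    ((((PySem.List.pyRange 0 (a.length : Int) 1).foldl
        (fun d i => d.modify (PySem.List.pyGetD a i 0) [] (fun xs => xs ++ [i]))
        PySem.Dict.empty).items).map (fun p => starLen a p.1 p.2))
    (fun x => x)).getD 0

-- ===== PRECONDITION & SPEC =====
-- Pre_ excludes the empty list, on which Python's max() raises ValueError (in A and in B alike).
def Pre_solution (a : List Int) : Prop := a ≠ []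
instance (a : List Int) : Decidable (Pre_solution a) := by unfold Pre_solution; infer_instance
def pvWitness_solution : List Int := [1]

def Spec_solution (a : List Int) (out : Int) : Prop := out = solution_alt a
instance (a : List Int) (out : Int) : Decidable (Spec_solution a out) := by unfold Spec_solution; infer_instance

-- ===== CLAIM (what is proved, stated in full; the proofs are below) =====
def Claim_equal_solution : Prop := ∀ (a : List Int), Dom_solution a → Pre_solution a → Spec_solution a (solution a)

-- ===== LEMMAS AND PROOFS =====

-- at an index holding v, the dict entry of v evolves exactly as B's greedy state
theorem getD_solutionStep_eq (a : List Int) (n v : Int) (d : PySem.Dict Int (Int × Int)) (i : Int)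
    (hx : PySem.List.pyGetD a i 0 = v) :
    (solutionStep a n d i).getD v (0, -1) = starStep a n v (d.getD v (0, -1)) i := by
  unfold solutionStep starStep
  rw [hx]
  by_cases hc : d.contains v
  · simp only [hc, if_pos]
    split_ifs <;> simp_all
  · simp only [hc, Bool.false_eq_true, if_false]
    have h1 : d.getD v ((0 : Int), (-1 : Int)) = (0, -1) :=
      PySem.Dict.getD_of_not_contains d _ (by simpa using hc)
    simp only [PySem.Dict.getD_insert, h1]
    split_ifs <;> simp_all

-- at an index holding another value, the dict entry of v is untouched
theorem getD_solutionStep_ne (a : List Int) (n v : Int) (d : PySem.Dict Int (Int × Int)) (i : Int)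
    (hx : PySem.List.pyGetD a i 0 ≠ v) :
    (solutionStep a n d i).getD v (0, -1) = d.getD v (0, -1) := by
  unfold solutionStep
  have hne : v ≠ PySem.List.pyGetD a i 0 := fun h => hx h.symm
  dsimp only
  split_ifs <;>
    by_cases hc : d.contains (PySem.List.pyGetD a i 0) <;>
    simp_all [PySem.Dict.getD_insert]

-- A's loop restricted to one value's entry is B's greedy over that value's occurrence indices
theorem getD_foldl_solutionStep (a : List Int) (n v : Int) (l : List Int)
    (d : PySem.Dict Int (Int × Int)) :
    ((l.foldl (solutionStep a n) d).getD v (0, -1))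
      = (l.filter (fun i => PySem.List.pyGetD a i 0 == v)).foldl (starStep a n v)
          (d.getD v (0, -1)) := by
  induction l generalizing d with
  | nil => rfl
  | cons i t ih =>
      by_cases hx : PySem.List.pyGetD a i 0 = v
      · simp only [List.foldl_cons, List.filter_cons, hx, beq_self_eq_true, if_pos,
          List.foldl_cons, ih, getD_solutionStep_eq a n v d i hx]
      · have hb : (PySem.List.pyGetD a i 0 == v) = false := by simpa using hx
        simp only [List.foldl_cons, List.filter_cons, hb, Bool.false_eq_true, if_false, ih,
          getD_solutionStep_ne a n v d i hx]

-- the keys after one A-step are the old keys with a[i] set-added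
theorem keys_solutionStep (a : List Int) (n : Int) (d : PySem.Dict Int (Int × Int)) (i : Int) :
    (solutionStep a n d i).keys = PySem.Set.add d.keys (PySem.List.pyGetD a i 0) := by
  unfold solutionStep
  by_cases hc : d.contains (PySem.List.pyGetD a i 0)
  · have hmem : PySem.Set.add d.keys (PySem.List.pyGetD a i 0) = d.keys := by
      simp [PySem.Set.add, (PySem.Dict.contains_iff_mem_keys d _).mp hc]
    simp only [hc, if_pos, hmem]
    split_ifs <;> simp [PySem.Dict.keys_insert_of_contains d _ hc]
  · have hcf : d.contains (PySem.List.pyGetD a i 0) = false := by simpa using hc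
    have hadd : PySem.Set.add d.keys (PySem.List.pyGetD a i 0)
        = d.keys ++ [PySem.List.pyGetD a i 0] := by
      simp only [PySem.Set.add]
      rw [if_neg]
      simp [PySem.Set.contains]
      intro h
      exact absurd ((PySem.Dict.contains_iff_mem_keys d _).mpr h) (by simpa using hc)
    simp only [hc, Bool.false_eq_true, if_false, hadd]
    split_ifs <;>
      simp [PySem.Dict.keys_insert_of_contains _ _ (PySem.Dict.contains_insert_self d _ _),
        PySem.Dict.keys_insert_of_not_contains d _ hcf]

theorem keys_foldl_solutionStep (a : List Int) (n : Int) (l : List Int)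
    (d : PySem.Dict Int (Int × Int)) :
    (l.foldl (solutionStep a n) d).keys
      = PySem.Set.update d.keys (l.map (fun i => PySem.List.pyGetD a i 0)) := by
  induction l generalizing d with
  | nil => rfl
  | cons i t ih =>
      simp only [List.foldl_cons, List.map_cons, ih, keys_solutionStep]
      rfl

-- B's positions dict holds, under each value, exactly the indices where that value occurs
theorem getD_posFold (a : List Int) (v : Int) (l : List Int) :
    ((l.foldl (fun d i => d.modify (PySem.List.pyGetD a i 0) [] (fun xs => xs ++ [i]))
        PySem.Dict.empty).getD v [])
      = l.filter (fun i => PySem.List.pyGetD a i 0 == v) := by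
  have h1 : (l.foldl (fun d i => d.modify (PySem.List.pyGetD a i 0) [] (fun xs => xs ++ [i]))
        (PySem.Dict.empty : PySem.Dict Int (List Int)))
      = ((l.map (fun i => (PySem.List.pyGetD a i 0, i))).foldl
          (fun d p => d.modify p.1 [] (fun xs => xs ++ [p.2])) PySem.Dict.empty) := by
    rw [List.foldl_map]
  rw [h1, PySem.Dict.getD_foldl_modify_append, PySem.Dict.getD_empty, List.filter_map,
    List.map_map]
  simp [Function.comp_def]

theorem solution_eq (a : List Int) : solution a = solution_alt a := by
  unfold solution solution_alt
  have hkA :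
      ((PySem.List.pyRange 0 (a.length : Int) 1).foldl
        (solutionStep a (a.length : Int)) PySem.Dict.empty).keys = PySem.Set.ofList a := by
    rw [keys_foldl_solutionStep, PySem.List.map_pyGetD_pyRange_zero' a 0,
      PySem.Set.ofList_eq_foldl, PySem.Dict.keys_empty]
    rfl
  have hnodupA :
      ((PySem.List.pyRange 0 (a.length : Int) 1).foldl
        (solutionStep a (a.length : Int)) PySem.Dict.empty).keys.Nodup := by
    rw [hkA]; exact PySem.Set.nodup_ofList a
  have hkB :
      ((PySem.List.pyRange 0 (a.length : Int) 1).foldl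
        (fun (d : PySem.Dict Int (List Int)) i =>
          d.modify (PySem.List.pyGetD a i 0) [] (fun xs => xs ++ [i]))
        PySem.Dict.empty).keys = PySem.Set.ofList a := by
    rw [PySem.Dict.keys_foldl_modify_key _ (fun i => PySem.List.pyGetD a i 0) []
        (fun _ i => fun xs => xs ++ [i]),
      PySem.List.map_pyGetD_pyRange_zero' a 0, PySem.Set.ofList_eq_foldl, PySem.Dict.keys_empty]
    rfl
  have hnodupB :
      ((PySem.List.pyRange 0 (a.length : Int) 1).foldl
        (fun (d : PySem.Dict Int (List Int)) i =>
          d.modify (PySem.List.pyGetD a i 0) [] (fun xs => xs ++ [i]))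
        PySem.Dict.empty).keys.Nodup := by
    rw [hkB]; exact PySem.Set.nodup_ofList a
  rw [PySem.Dict.values_eq_map_keys _ hnodupA ((0 : Int), (-1 : Int)),
    PySem.Dict.items_eq_map_keys _ hnodupB [], hkA, hkB, List.map_map, List.map_map]
  refine congrArg (fun l => (PySem.List.max? l (fun x => x)).getD 0) (List.map_congr_left ?_)
  intro k _
  simp only [Function.comp_apply, getD_foldl_solutionStep, PySem.Dict.getD_empty,
    getD_posFold, starLen]

-- ===== VERDICT (by name: the statement is the Claim_ definition above) =====
theorem solution_spec : Claim_equal_solution := by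
  intro a _ _
  unfold Spec_solution
  exact solution_eq a
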